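-- pv_equiv track=rewrite | github.com/BIM3DNA/AI-Systems-Intelligent-Automation | AI.extension/lib/ai_reviewed_code.py | _is_allowed_import
-- ===== SOURCE A (Python) =====
-- ALLOWED_IMPORT_PREFIXES = [
--     "Autodesk.Revit",
--     "pyrevit",
--     "System",
--     "clr",
--     "math",
--     "re",
--     "json",
--     "time",
--     "collections",
--     "itertools",
-- ]
--
-- ALLOWED_LIB_MODULES = [
--     "ai_local_store",
--     "ai_prompt_registry",
--     "ai_agent_session",
--     "ai_reviewed_code",
-- ]
--
-- def _is_allowed_import(module_name):
--     for prefix in ALLOWED_IMPORT_PREFIXES: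
--         if module_name == prefix or module_name.startswith(prefix + "."):
--             return True
--     for prefix in ALLOWED_LIB_MODULES:
--         if module_name == prefix or module_name.startswith(prefix + "."):
--             return True
--     return False
-- ===== SOURCE B (Python) =====
-- ALLOWED_IMPORT_PREFIXES = [
--     "Autodesk.Revit",
--     "pyrevit",
--     "System",
--     "clr",
--     "math",
--     "re",
--     "json",
--     "time",
--     "collections",
--     "itertools",
-- ]
--
-- ALLOWED_LIB_MODULES = [
--     "ai_local_store",
--     "ai_prompt_registry",
--     "ai_agent_session",
--     "ai_reviewed_code",
-- ]
--
-- ALLOWED = set(ALLOWED_IMPORT_PREFIXES) | set(ALLOWED_LIB_MODULES)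
--
--
-- def _is_allowed_import(module_name):
--     # Single pass over the input: test each dot-delimited prefix (and finally
--     # the whole name) for membership in one combined set of allowed names.
--     prefix = ""
--     for ch in module_name:
--         if ch == "." and prefix in ALLOWED:
--             return True
--         prefix += ch
--     return prefix in ALLOWED
-- ===== Notes on version B (the rewrite author's own statement) =====
-- stated objective: alternative
-- what changed: Instead of scanning the 14 allowed prefixes and doing an equality/startswith test per prefix, B makes one left-to-right pass over the module name, testing the prefix before each dot (and finally the whole name) for membership in a single combined set of both lists.
import Mathlib
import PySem

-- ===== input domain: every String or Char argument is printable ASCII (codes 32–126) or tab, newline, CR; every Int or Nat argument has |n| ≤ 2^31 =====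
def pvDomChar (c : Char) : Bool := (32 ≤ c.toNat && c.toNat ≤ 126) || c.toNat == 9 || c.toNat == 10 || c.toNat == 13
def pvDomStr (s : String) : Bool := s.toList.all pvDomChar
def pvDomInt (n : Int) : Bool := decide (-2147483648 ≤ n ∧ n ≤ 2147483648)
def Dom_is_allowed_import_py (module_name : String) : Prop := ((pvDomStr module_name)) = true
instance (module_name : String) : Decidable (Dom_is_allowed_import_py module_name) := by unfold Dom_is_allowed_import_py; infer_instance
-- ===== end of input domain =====

-- B replaces A's scan over each allowed prefix (string compare + startswith per prefix) by a single
-- left-to-right pass over the input that tests each dot-delimited prefix against one combined set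
-- (objective: alternative, same asymptotic cost).

-- ===== PORT A =====
def pvAllowedImportPrefixes : List String :=
  ["Autodesk.Revit", "pyrevit", "System", "clr", "math", "re", "json", "time", "collections", "itertools"]

def pvAllowedLibModules : List String :=
  ["ai_local_store", "ai_prompt_registry", "ai_agent_session", "ai_reviewed_code"]

-- 'for prefix in L: if module_name == prefix or module_name.startswith(prefix + "."): return True'
def pvLoopA (module_name : String) : List String → Bool
  | [] => false
  | p :: rest =>
    if module_name == p || PySem.Str.startswith module_name (p ++ ".") then true
    else pvLoopA module_name rest

def is_allowed_import_py (module_name : String) : Bool :=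
  -- the two sequential for-loops of A (each returning True on a hit), then 'return False'
  if pvLoopA module_name pvAllowedImportPrefixes then true
  else if pvLoopA module_name pvAllowedLibModules then true
  else false

-- ===== PORT B =====
-- ALLOWED = set(ALLOWED_IMPORT_PREFIXES) | set(ALLOWED_LIB_MODULES); represented at the List Char
-- level (exact: String ↔ List Char is bijective and membership uses string equality)
def pvAllowed : PySem.Set (List Char) :=
  PySem.Set.union (PySem.Set.ofList (pvAllowedImportPrefixes.map String.toList))
                  (PySem.Set.ofList (pvAllowedLibModules.map String.toList))

-- 'prefix = ""; for ch in module_name: if ch == "." and prefix in ALLOWED: return True; prefix += ch'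
def pvLoopB (pre : List Char) : List Char → Bool
  | [] => PySem.Set.contains pvAllowed pre          -- 'return prefix in ALLOWED'
  | c :: rest =>
    if c == '.' && PySem.Set.contains pvAllowed pre then true
    else pvLoopB (pre ++ [c]) rest

def is_allowed_import_py_alt (module_name : String) : Bool :=
  pvLoopB [] module_name.toList

-- ===== PRECONDITION & SPEC =====
def Spec_is_allowed_import_py (module_name : String) (out : Bool) : Prop := out = is_allowed_import_py_alt module_name
instance (module_name : String) (out : Bool) : Decidable (Spec_is_allowed_import_py module_name out) := by unfold Spec_is_allowed_import_py; infer_instance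

-- ===== CLAIM (what is proved, stated in full; the proofs are below) =====
def Claim_equal_is_allowed_import_py : Prop := ∀ (module_name : String), Dom_is_allowed_import_py module_name → Spec_is_allowed_import_py module_name (is_allowed_import_py module_name)

-- ===== LEMMAS AND PROOFS =====

-- A's per-list loop hits exactly when some prefix in the list matches whole or is followed by a dot
theorem pvLoopA_iff (m : String) (L : List String) :
    pvLoopA m L = true ↔
      ∃ p ∈ L, m.toList = p.toList ∨ (p.toList ++ ['.']) <+: m.toList := by
  induction L with
  | nil => simp [pvLoopA]
  | cons p rest ih =>
    simp only [pvLoopA]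
    split_ifs with h
    · simp only [Bool.or_eq_true, beq_iff_eq, PySem.Str.startswith_eq,
        PySem.Chars.startswith_iff] at h
      constructor
      · intro _
        refine ⟨p, List.mem_cons_self .., ?_⟩
        rcases h with h | h
        · exact Or.inl (by rw [h])
        · exact Or.inr (by simpa using h)
      · intro _; rfl
    · simp only [Bool.or_eq_true, beq_iff_eq, PySem.Str.startswith_eq,
        PySem.Chars.startswith_iff, not_or] at h
      rw [ih]
      constructor
      · rintro ⟨q, hq, hcond⟩; exact ⟨q, List.mem_cons_of_mem _ hq, hcond⟩
      · rintro ⟨q, hq, hcond⟩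
        rcases List.mem_cons.mp hq with rfl | hq'
        · exfalso
          rcases hcond with hc | hc
          · exact h.1 (by apply String.ext; simpa using hc)
          · exact h.2 (by simpa using hc)
        · exact ⟨q, hq', hcond⟩

-- B's loop hits exactly when the full string, or the prefix before some dot, is in the set
theorem pvLoopB_iff (rest pre : List Char) :
    pvLoopB pre rest = true ↔
      (pre ++ rest) ∈ pvAllowed ∨
        ∃ k < rest.length, rest[k]? = some '.' ∧ (pre ++ rest.take k) ∈ pvAllowed := by
  induction rest generalizing pre with
  | nil => simp [pvLoopB]
  | cons c rest ih =>
    simp only [pvLoopB]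
    split_ifs with h
    · simp only [Bool.and_eq_true, beq_iff_eq, PySem.Set.contains_iff] at h
      constructor
      · intro _
        refine Or.inr ⟨0, by simp, ?_, by simpa using h.2⟩
        simp [h.1]
      · intro _; rfl
    · simp only [Bool.and_eq_true, beq_iff_eq, PySem.Set.contains_iff, not_and_or] at h
      rw [ih]
      constructor
      · rintro (hm | ⟨k, hk, hdot, hmem⟩)
        · exact Or.inl (by simpa using hm)
        · refine Or.inr ⟨k + 1, by simpa using hk, by simpa using hdot, ?_⟩
          simpa using hmem
      · rintro (hm | ⟨k, hk, hdot, hmem⟩)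
        · exact Or.inl (by simpa using hm)
        · match k with
          | 0 =>
            exfalso
            simp only [List.getElem?_cons_zero, Option.some.injEq] at hdot
            simp only [List.take_zero, List.append_nil] at hmem
            rcases h with h | h
            · exact h hdot
            · exact h hmem
          | k + 1 =>
            refine Or.inr ⟨k, by simpa using hk, by simpa using hdot, ?_⟩
            simpa using hmem

-- 'p ++ "." is a prefix of s' ⇔ 's has a dot at some position k whose left part is p'
theorem prefix_dot_iff (p s : List Char) :
    (p ++ ['.']) <+: s ↔ ∃ k < s.length, s[k]? = some '.' ∧ s.take k = p := by
  constructor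
  · rintro ⟨t, ht⟩
    have hs : s = p ++ '.' :: t := by rw [← ht]; simp
    subst hs
    refine ⟨p.length, by simp, ?_, ?_⟩
    · rw [List.getElem?_append_right (le_refl _)]; simp
    · rw [List.take_append_of_le_length (le_refl _)]; simp
  · rintro ⟨k, hk, hdot, htake⟩
    refine ⟨s.drop (k + 1), ?_⟩
    have hget : s[k]'hk = '.' := by
      rw [List.getElem?_eq_getElem hk] at hdot
      exact Option.some.inj hdot
    conv_rhs => rw [← List.take_append_drop k s]
    rw [htake, List.drop_eq_getElem_cons hk, hget]
    simp

-- membership in the combined set ⇔ membership in one of the two source lists (as char lists)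
theorem mem_pvAllowed (x : List Char) :
    x ∈ pvAllowed ↔
      (∃ p ∈ pvAllowedImportPrefixes, p.toList = x) ∨
        (∃ p ∈ pvAllowedLibModules, p.toList = x) := by
  simp [pvAllowed, PySem.Set.mem_union, PySem.Set.mem_ofList, List.mem_map]

theorem main_iff (m : String) :
    is_allowed_import_py m = true ↔ is_allowed_import_py_alt m = true := by
  have hA : is_allowed_import_py m = true ↔
      (∃ p ∈ pvAllowedImportPrefixes, m.toList = p.toList ∨ (p.toList ++ ['.']) <+: m.toList) ∨
        (∃ p ∈ pvAllowedLibModules, m.toList = p.toList ∨ (p.toList ++ ['.']) <+: m.toList) := by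
    unfold is_allowed_import_py
    split_ifs with h1 h2
    · simp only [true_iff]; exact Or.inl ((pvLoopA_iff m _).mp h1)
    · simp only [true_iff]; exact Or.inr ((pvLoopA_iff m _).mp h2)
    · simp only [false_iff, not_or]
      exact ⟨fun hc => h1 ((pvLoopA_iff m _).mpr hc),
             fun hc => h2 ((pvLoopA_iff m _).mpr hc)⟩
  rw [hA, is_allowed_import_py_alt, pvLoopB_iff]
  simp only [List.nil_append, mem_pvAllowed, prefix_dot_iff]
  constructor
  · rintro (⟨p, hp, hcond⟩ | ⟨p, hp, hcond⟩) <;>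
    · rcases hcond with heq | ⟨k, hk, hdot, htake⟩
      · exact Or.inl (by first
          | exact Or.inl ⟨p, hp, heq.symm⟩
          | exact Or.inr ⟨p, hp, heq.symm⟩)
      · exact Or.inr ⟨k, hk, hdot, by first
          | exact Or.inl ⟨p, hp, htake.symm⟩
          | exact Or.inr ⟨p, hp, htake.symm⟩⟩
  · rintro (hfull | ⟨k, hk, hdot, hmem⟩)
    · rcases hfull with ⟨p, hp, heq⟩ | ⟨p, hp, heq⟩
      · exact Or.inl ⟨p, hp, Or.inl heq.symm⟩
      · exact Or.inr ⟨p, hp, Or.inl heq.symm⟩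
    · rcases hmem with ⟨p, hp, htake⟩ | ⟨p, hp, htake⟩
      · exact Or.inl ⟨p, hp, Or.inr ⟨k, hk, hdot, htake.symm⟩⟩
      · exact Or.inr ⟨p, hp, Or.inr ⟨k, hk, hdot, htake.symm⟩⟩

-- ===== VERDICT (by name: the statement is the Claim_ definition above) =====
theorem is_allowed_import_py_spec : Claim_equal_is_allowed_import_py := by
  intro m _
  unfold Spec_is_allowed_import_py
  have h := main_iff m
  cases hA : is_allowed_import_py m with
  | true => exact (h.mp hA).symm
  | false =>
    cases hB : is_allowed_import_py_alt m with
    | true => exact absurd (h.mpr hB) (by simp [hA])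
    | false => rfl
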